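/-
  MEMORY AND WORD LEMMAS THAT EVERY PROGRAM PROOF NEEDS (program-independent; first written in the trees of giflib and lodepng, in the
  shared namespaces `X86.User.Mem` and `X86.Word` already: every lemma keeps its full name and statement).

  §1  A NUMBER AS A WORD                                                                                namespace X86.Word
      Word.eq_ofNat_of_toNat h        w.toNat = n → w = UInt64.ofNat n        (an assertion says `(v.reg .r13).toNat = p`, the walker wants the
                                      EQUATION `c_r13 : v.reg .r13 = UInt64.ofNat p := Word.eq_ofNat_of_toNat h_r13`; `open X86`)
  §2  A NARROWER READ OF A WIDER STORE                                                                  namespace X86.User.Mem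
      Mem.readLE_prefix f a k j       f.readLE a k = f.readLE a (k + j) % 256 ^ k
      Mem.readLE_writeLE_prefix       k ≤ n → (f.writeLE a n v).readLE a k = v % 256 ^ n % 256 ^ k
      Mem.readLE4_of_writeLE8         x < 2 ^ 32 → (f.writeLE a 8 x).readLE a 4 = x                       (`push r64 ; mov r32, [rsp]`)
      Mem.readLE1_of_writeLE4         (f.writeLE a 4 v).readLE a 1 = v % 256                              (`mov [m], r32 ; movzx eax, byte [m]`)
      Mem.readLE1_of_readLE4_lt       f.readLE a 4 = x, x < 256 → f.readLE a 1 = x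
      Mem.readLE4_of_readLE8_lt       f.readLE a 8 = x, x < 2 ^ 32 → f.readLE a 4 = x
      (the same for a read at a number, `rd mem a n`: ProgX/Words.lean §6)
  §3  FOOTPRINTS                                                                                        namespace X86.User.Mem
      Mem.SameExcept.shrink_eqOn      every window of the footprint is a window of the new footprint, or the memories agree on it anyway
      Mem.SameExcept.drop_eqOn        drop the first window when the memories agree on it (a window the path taken did not write)
      Mem.SameExcept.drop_empty       drop the first window when it is empty (a buffer of 0 bytes)
      Mem.SameExcept.append           two footprints in a row: the windows of both
      Mem.SameExcept.readLE_through   a word of memory through a footprint that misses it, as a TRANSPORT (`m.readLE a k = x → m'.readLE a k = x`)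
      Mem.SameExcept.readLE_through_ra      the same for the return address's slot (`UInt64.ofNat (m.readLE a k) = ret`)
  No `sorry`, no axiom, no `bv_decide`, no `native_decide`.
-/
import X86.Derived.User.Frame
namespace X86.Word
open X86 X86.User

/-! ### §1 A number as a word -/

/-- **A register whose number is `n` IS the word `UInt64.ofNat n`**: an assertion states a register as `(v.reg .r13).toNat = p`, the
walker wants the equation (`c_r13 : v.reg .r13 = UInt64.ofNat p := Word.eq_ofNat_of_toNat h_r13`), so that every later address speaks
of `UInt64.ofNat p`. -/
theorem eq_ofNat_of_toNat {w : Word} {n : Nat} (h : w.toNat = n) : w = UInt64.ofNat n := by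
  rw [← h, UInt64.ofNat_toNat]

end X86.Word

namespace X86.User.Mem
open X86 X86.User

/-! ### §2 A narrower read of a wider store

  `mov [rsp+4], r8d … movzx eax, byte [rsp+4]` (an `int` spilled, its low byte reloaded), `push r ; mov eax, [rsp]` (a dword read of a
  pushed qword): neither the walker nor `u_read` / `u_resolve` reads a PREFIX of a store; the load stays `(nest).readLE a k` inside later
  values. Rewrite `w_mem` / the hypothesis with these. -/

/-- The low `k` bytes of a little-endian read of `k + j` bytes. -/
theorem readLE_prefix (f : Mem) (a : Word) (k j : Nat) : f.readLE a k = f.readLE a (k + j) % 256 ^ k := by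
  induction k generalizing a with
  | zero =>
    rw [Nat.pow_zero, Nat.mod_one]
    rfl
  | succ k ih =>
    have e : k + 1 + j = (k + j) + 1 := by omega
    rw [e]
    simp only [Mem.readLE]
    rw [ih (a + 1), Nat.pow_succ, Nat.mul_comm (256 ^ k) 256, Nat.mod_mul]
    have hb : (f.read a).toNat < 256 := UInt8.toNat_lt _
    have e1 : ((f.read a).toNat + 256 * f.readLE (a + 1) (k + j)) % 256 = (f.read a).toNat := by
      omega
    have e2 : ((f.read a).toNat + 256 * f.readLE (a + 1) (k + j)) / 256 = f.readLE (a + 1) (k + j) := by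
      omega
    rw [e1, e2]

/-- A `k`-byte read of an `n`-byte store at the same address, `k ≤ n`: the low `k` bytes of the stored value. -/
theorem readLE_writeLE_prefix (f : Mem) (a : Word) (k n v : Nat) (hk : k ≤ n) (hn : n ≤ 2 ^ 64) :
    (f.writeLE a n v).readLE a k = v % 256 ^ n % 256 ^ k := by
  obtain ⟨j, rfl⟩ : ∃ j, n = k + j := ⟨n - k, by omega⟩
  rw [readLE_prefix _ a k j, Mem.readLE_writeLE_same _ _ _ _ hn]

/-- A dword read of a qword just stored at the same address (`push r64 ; mov r32, [rsp]`). -/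
theorem readLE4_of_writeLE8 (f : Mem) (a : Word) (x : Nat) (hx : x < 2 ^ 32) : (f.writeLE a 8 x).readLE a 4 = x := by
  rw [readLE_prefix _ a 4 4, Mem.readLE_writeLE_same _ _ _ _ (by decide)]
  omega

/-- A byte read of a dword just stored at the same address (`mov [m], r32 ; movzx eax, byte [m]`): the low byte. -/
theorem readLE1_of_writeLE4 (f : Mem) (a : Word) (v : Nat) : (f.writeLE a 4 v).readLE a 1 = v % 256 := by
  rw [readLE_prefix _ a 1 3, Mem.readLE_writeLE_same _ _ _ _ (by decide)]
  omega

/-- The low byte of a dword slot whose value is a byte (`movzx ecx, BYTE PTR [rbp-0x48]` of an `int` slot). -/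
theorem readLE1_of_readLE4_lt (f : Mem) (a : Word) (x : Nat) (h : f.readLE a 4 = x) (hx : x < 256) : f.readLE a 1 = x := by
  rw [readLE_prefix _ a 1 3, h]
  omega

/-- The low dword of a qword slot whose value is a dword (`mov eax, [rsp+8]` of a slot a `mov [rsp+8], rax` filled). -/
theorem readLE4_of_readLE8_lt (f : Mem) (a : Word) (x : Nat) (h : f.readLE a 8 = x) (hx : x < 2 ^ 32) : f.readLE a 4 = x := by
  rw [readLE_prefix _ a 4 4, h]
  omega

/-! ### §3 Footprints -/

/-- **The general form of dropping windows**: every window of the footprint is a window of the new footprint, or the two memories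
agree on it anyway (it was not written after all, or the same bytes were written back, or it is empty). -/
theorem SameExcept.shrink_eqOn {ws ws' : List Span} {m m' : Mem} (h : Mem.SameExcept ws m m')
    (hsub : ∀ w, w ∈ ws → w ∈ ws' ∨ Mem.EqOn w.lo w.hi m m') : Mem.SameExcept ws' m m' := by
  intro a ha
  by_cases hin : ∃ w, w ∈ ws ∧ ¬ (w ∈ ws') ∧ w.lo ≤ a.toNat ∧ a.toNat < w.hi
  · obtain ⟨w, hw, hnot, h1, h2⟩ := hin
    rcases hsub w hw with hmem | he
    · exact absurd hmem hnot
    · exact he a h1 h2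
  · apply h a
    intro w hw
    by_cases hmem : w ∈ ws'
    · exact ha w hmem
    · apply Classical.byContradiction
      intro hno
      apply hin
      refine ⟨w, hw, hmem, ?_, ?_⟩
      · omega
      · omega

/-- **Drop the first window of a footprint when the memories agree on it.** Used when a contract's footprint names a window the
path taken did not write (`gif.Error` on the GIF_OK path). -/
theorem SameExcept.drop_eqOn {w : Span} {ws : List Span} {m m' : Mem} (h : Mem.SameExcept (w :: ws) m m')
    (he : Mem.EqOn w.lo w.hi m m') : Mem.SameExcept ws m m' := by
  intro a ha
  by_cases hin : w.lo ≤ a.toNat ∧ a.toNat < w.hi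
  · exact he a hin.1 hin.2
  · apply h a
    intro w' hw'
    rcases List.mem_cons.mp hw' with e | hr
    · rw [e]
      omega
    · exact ha w' hr

/-- **Drop the first window of a footprint when it is empty** (`w.hi ≤ w.lo`: a buffer of 0 bytes). -/
theorem SameExcept.drop_empty {w : Span} {ws : List Span} {m m' : Mem} (h : Mem.SameExcept (w :: ws) m m')
    (he : w.hi ≤ w.lo) : Mem.SameExcept ws m m' := by
  apply h.drop_eqOn
  intro a h1 h2
  omega

/-- **Two footprints in a row**: the windows of both (no `u_same` over a long literal list: its side conditions are one `omega`
per window pair, and the truncated subtractions `p - 24` of five pointers are 2^10 cases each). -/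
theorem SameExcept.append {ws ws' : List Span} {μ ν ξ : Mem} (h1 : Mem.SameExcept ws μ ν) (h2 : Mem.SameExcept ws' ν ξ) :
    Mem.SameExcept (ws ++ ws') μ ξ := by
  have k1 : Mem.SameExcept (ws ++ ws') μ ν := by
    apply h1.mono
    intro w hw a ha1 ha2
    exact ⟨w, List.mem_append_left _ hw, ha1, ha2⟩
  have k2 : Mem.SameExcept (ws ++ ws') ν ξ := by
    apply h2.mono
    intro w hw a ha1 ha2
    exact ⟨w, List.mem_append_right _ hw, ha1, ha2⟩
  exact k1.trans k2

/-- **A word of memory through a footprint that misses it** (a saved register's slot, a spill, a field): the pure form of `u_frame`.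
Prove the miss condition ONCE for all slots of an exit assertion (`hmiss : ∀ a, <the slots' range> → ∀ w ∈ [literal windows],
a + 8 ≤ w.lo ∨ w.hi ≤ a`): `u_frame` per slot costs 3-4 s each behind a callee with three windows. The TRANSPORT form of
`Mem.SameExcept.readLE` (which is the equation `m'.readLE a k = m.readLE a k`). -/
theorem SameExcept.readLE_through {ws : List Span} {m m' : Mem} {a : Word} {k x : Nat} (hs : Mem.SameExcept ws m m')
    (h : m.readLE a k = x) (hd : ∀ w ∈ ws, a.toNat + k ≤ w.lo ∨ w.hi ≤ a.toNat) (h3 : a.toNat + k < 2 ^ 64) :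
    m'.readLE a k = x := by
  rw [hs.readLE a k h3 hd]
  exact h

/-- **The same for the return address's slot** (`UInt64.ofNat (mem.readLE rsp 8) = ret`: `Body.slot_ra`). -/
theorem SameExcept.readLE_through_ra {ws : List Span} {m m' : Mem} {a : Word} {k : Nat} {x : Word}
    (hs : Mem.SameExcept ws m m') (h : UInt64.ofNat (m.readLE a k) = x)
    (hd : ∀ w ∈ ws, a.toNat + k ≤ w.lo ∨ w.hi ≤ a.toNat) (h3 : a.toNat + k < 2 ^ 64) : UInt64.ofNat (m'.readLE a k) = x := by
  rw [hs.readLE a k h3 hd]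
  exact h

end X86.User.Mem
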